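-- pv_equiv track=rewrite | github.com/Waqar-Murtaza-ignicube/Email-Extractor | main.py | format_emails
-- ===== SOURCE A (Python) =====
-- def format_emails(emails):
--     """formatting emails"""
--     for i, email in enumerate(emails):
--         if email is not None:
--             parts = email.split('.')
--             if parts[-1] == 'c' or parts[-1] == 'co' or parts[-1] == '':
--                 parts[-1] = 'com'
--                 emails[i] = '.'.join(parts)
--     return emails
-- ===== SOURCE B (Python) =====
-- def _fix(email):
--     head, sep, tail = email.partition('.')
--     if sep:
--         return head + sep + _fix(tail)
--     return 'com' if head in ('', 'c', 'co') else head
--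
--
-- def format_emails(emails):
--     """formatting emails"""
--     for i, email in enumerate(emails):
--         if email is not None:
--             emails[i] = _fix(email)
--     return emails
-- ===== Notes on version B (the rewrite author's own statement) =====
-- stated objective: alternative
-- what changed: A splits the whole address into all components, patches the last list entry and re-joins; B recursively partitions at the first dot and rewrites only the final component after the last dot, never materialising the component list.
import Mathlib
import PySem

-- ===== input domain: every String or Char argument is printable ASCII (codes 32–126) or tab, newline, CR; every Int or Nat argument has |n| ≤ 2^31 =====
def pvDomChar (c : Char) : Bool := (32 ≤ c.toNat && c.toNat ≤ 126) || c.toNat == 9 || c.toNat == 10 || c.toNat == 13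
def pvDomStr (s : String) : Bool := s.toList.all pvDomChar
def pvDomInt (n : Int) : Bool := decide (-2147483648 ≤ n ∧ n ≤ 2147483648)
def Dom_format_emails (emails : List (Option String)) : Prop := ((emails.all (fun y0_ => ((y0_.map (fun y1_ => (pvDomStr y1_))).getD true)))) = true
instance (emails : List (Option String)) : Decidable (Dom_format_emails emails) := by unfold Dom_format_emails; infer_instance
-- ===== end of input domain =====

-- B replaces A's split-all-components/patch/join by a recursion that partitions at the first
-- '.' and rewrites only the final component (objective: alternative).
-- A mutates `emails` in place; the equivalence proved here is about the RETURN value only.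


-- termination fact both recursive definitions cite: the tail after the first '.' is shorter
theorem pvTailDropWhile_lt (cs : List Char) (h : '.' ∈ cs) :
    ((cs.dropWhile (· ≠ '.')).tail).length < cs.length := by
  have h1 : cs.dropWhile (· ≠ '.') ≠ [] := by
    intro hnil
    have := List.dropWhile_eq_nil_iff.mp hnil '.' h
    simp at this
  have h2 := List.length_dropWhile_le (fun x => decide (x ≠ '.')) cs
  have h3 := List.length_pos_of_ne_nil h1
  have h4 : cs ≠ [] := by rintro rfl; simp at h
  have h5 := List.length_pos_of_ne_nil h4
  simp only [List.length_tail]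
  omega

-- ===== PORT A =====
-- per-element body of A's loop: split on '.', patch the last part if truncated, rejoin
def pvFixA (email : String) : String :=
  let parts := PySem.Chars.splitOn email.toList ['.']
  match PySem.List.pyGet? parts (-1) with
  | none => email        -- unreachable: split always returns a nonempty list
  | some last =>
    if last = ['c'] ∨ last = ['c', 'o'] ∨ last = [] then
      String.ofList (PySem.Chars.join ['.'] (parts.set (parts.length - 1) ['c', 'o', 'm']))
    else email

def format_emails (emails : List (Option String)) : List (Option String) :=
  emails.map (fun email =>
    match email with
    | none => none
    | some s => some (pvFixA s))

-- ===== PORT B =====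
-- Source B's `_fix`: partition at the first '.' (head = takeWhile, tail after the dot) and recurse
def pvFixB (cs : List Char) : List Char :=
  if h : '.' ∈ cs then
    cs.takeWhile (· ≠ '.') ++ '.' :: pvFixB ((cs.dropWhile (· ≠ '.')).tail)
  else if cs = [] ∨ cs = ['c'] ∨ cs = ['c', 'o'] then ['c', 'o', 'm']
  else cs
termination_by cs.length
decreasing_by exact pvTailDropWhile_lt cs h

def format_emails_alt (emails : List (Option String)) : List (Option String) :=
  emails.map (fun email => email.map (fun s => String.ofList (pvFixB s.toList)))

-- ===== PRECONDITION & SPEC =====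
def Spec_format_emails (emails : List (Option String)) (out : List (Option String)) : Prop := out = format_emails_alt emails
instance (emails : List (Option String)) (out : List (Option String)) : Decidable (Spec_format_emails emails out) := by unfold Spec_format_emails; infer_instance

-- ===== CLAIM (what is proved, stated in full; the proofs are below) =====
def Claim_equal_format_emails : Prop := ∀ (emails : List (Option String)), Dom_format_emails emails → Spec_format_emails emails (format_emails emails)

-- ===== LEMMAS AND PROOFS =====

-- reference splitter: split at the first '.', recurse on the rest (same recursion as pvFixB)
def pvSplitD (cs : List Char) : List (List Char) :=
  if h : '.' ∈ cs then
    cs.takeWhile (· ≠ '.') :: pvSplitD ((cs.dropWhile (· ≠ '.')).tail)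
  else [cs]
termination_by cs.length
decreasing_by exact pvTailDropWhile_lt cs h

theorem pvSplitD_pos (cs : List Char) (h : '.' ∈ cs) :
    pvSplitD cs = cs.takeWhile (· ≠ '.') :: pvSplitD ((cs.dropWhile (· ≠ '.')).tail) := by
  rw [pvSplitD, dif_pos h]

theorem pvSplitD_neg (cs : List Char) (h : '.' ∉ cs) : pvSplitD cs = [cs] := by
  rw [pvSplitD, dif_neg h]

theorem pvFixB_pos (cs : List Char) (h : '.' ∈ cs) :
    pvFixB cs = cs.takeWhile (· ≠ '.') ++ '.' :: pvFixB ((cs.dropWhile (· ≠ '.')).tail) := by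
  rw [pvFixB, dif_pos h]

theorem pvFixB_neg (cs : List Char) (h : '.' ∉ cs) :
    pvFixB cs = if cs = [] ∨ cs = ['c'] ∨ cs = ['c', 'o'] then ['c', 'o', 'm'] else cs := by
  rw [pvFixB, dif_neg h]

theorem pvSplitD_ne_nil (cs : List Char) : pvSplitD cs ≠ [] := by
  rw [pvSplitD]; split <;> simp

theorem pvDropWhile_dot (cs : List Char) (h : '.' ∈ cs) :
    cs.dropWhile (· ≠ '.') = '.' :: (cs.dropWhile (· ≠ '.')).tail := by
  induction cs with
  | nil => simp at h
  | cons c r ih =>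
    by_cases hc : c = '.'
    · subst hc; simp
    · have hr : '.' ∈ r := by
        rcases List.mem_cons.mp h with h1 | h1
        · exact absurd h1.symm hc
        · exact h1
      simp only [List.dropWhile_cons]
      rw [if_pos (by simp [hc])]
      exact ih hr

theorem pv_go_eq (fuel : Nat) : ∀ (l cur : List Char) (acc : List (List Char)),
    l.length < fuel →
    PySem.Chars.splitOn.go ['.'] fuel l cur acc =
      acc.reverse ++ (pvSplitD l).modifyHead (cur.reverse ++ ·) := by
  induction fuel with
  | zero => intro l cur acc h; omega
  | succ f ih =>
    intro l cur acc h
    cases l with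
    | nil =>
      rw [PySem.Chars.splitOn.go, pvSplitD_neg _ (by simp)]
      simp
      omega
    | cons c rest =>
      rw [PySem.Chars.splitOn.go]
      simp only [List.length_cons] at h
      by_cases hc : c = '.'
      · subst hc
        have hpre : List.isPrefixOf ['.'] ('.' :: rest) = true := by simp [List.isPrefixOf]
        rw [if_pos hpre]
        have hdrop : List.drop (['.'] : List Char).length ('.' :: rest) = rest := by simp
        rw [hdrop, ih rest [] (cur.reverse :: acc) (by omega)]
        rw [pvSplitD_pos _ List.mem_cons_self]
        have htw : ('.' :: rest).takeWhile (· ≠ '.') = [] := by simp [List.takeWhile]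
        have hdw : ('.' :: rest).dropWhile (· ≠ '.') = '.' :: rest := by simp [List.dropWhile]
        rw [htw, hdw]
        simp only [List.tail_cons, List.reverse_cons, List.reverse_nil, List.nil_append]
        cases pvSplitD rest <;> simp
      · have hpre : List.isPrefixOf ['.'] (c :: rest) = false := by
          simp [List.isPrefixOf]
          exact fun hh => hc hh.symm
        rw [if_neg (by simp [hpre])]
        rw [ih rest (c :: cur) acc (by omega)]
        congr 1
        have htw : (c :: rest).takeWhile (· ≠ '.') = c :: rest.takeWhile (· ≠ '.') := by
          simp [List.takeWhile, hc]
        have hdw : (c :: rest).dropWhile (· ≠ '.') = rest.dropWhile (· ≠ '.') := by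
          simp [List.dropWhile, hc]
        by_cases hm : '.' ∈ rest
        · have hm' : '.' ∈ c :: rest := List.mem_cons_of_mem _ hm
          rw [pvSplitD_pos _ hm, pvSplitD_pos _ hm', htw, hdw]
          simp
        · have hm' : '.' ∉ c :: rest := by
            simp only [List.mem_cons]
            rintro (h1 | h1)
            · exact hc h1.symm
            · exact hm h1
          rw [pvSplitD_neg _ hm, pvSplitD_neg _ hm']
          simp

theorem pvSplitOn_eq (cs : List Char) :
    PySem.Chars.splitOn cs ['.'] = pvSplitD cs := by
  rw [PySem.Chars.splitOn, pv_go_eq (cs.length + 1) cs [] [] (by omega)]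
  cases h : pvSplitD cs with
  | nil => exact absurd h (pvSplitD_ne_nil cs)
  | cons p ps => simp

theorem pvSet_last {α : Type} (xs : List α) (h : xs ≠ []) (v : α) :
    xs.set (xs.length - 1) v = xs.dropLast ++ [v] := by
  induction xs with
  | nil => simp at h
  | cons x t ih =>
    cases t with
    | nil => simp
    | cons y u =>
      have hlen : (x :: y :: u).length - 1 = ((y :: u).length - 1) + 1 := by simp
      rw [hlen]
      simp only [List.set_cons_succ, List.dropLast_cons_of_ne_nil (by simp : (y :: u) ≠ [])]
      rw [ih (by simp)]
      simp

theorem pvGetLast?_cons {α : Type} (x : α) (ys : List α) (h : ys ≠ []) :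
    (x :: ys).getLast? = ys.getLast? := by
  cases ys with
  | nil => simp at h
  | cons y u => simp [List.getLast?_cons_cons]

-- the key bridge: pvFixB computes exactly "patch the last component of pvSplitD, rejoin"
theorem pvFixB_eq (cs : List Char) :
    pvFixB cs =
      if ((pvSplitD cs).getLast?.getD []) = ['c'] ∨ ((pvSplitD cs).getLast?.getD []) = ['c', 'o'] ∨ ((pvSplitD cs).getLast?.getD []) = [] then
        PySem.Chars.join ['.'] ((pvSplitD cs).dropLast ++ [['c', 'o', 'm']])
      else cs := by
  induction hn : cs.length using Nat.strong_induction_on generalizing cs with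
  | _ n ih =>
  subst hn
  by_cases h : '.' ∈ cs
  · have hlt := pvTailDropWhile_lt cs h
    rw [pvFixB_pos _ h, pvSplitD_pos _ h]
    set tl := (cs.dropWhile (· ≠ '.')).tail with htl
    have hne := pvSplitD_ne_nil tl
    rw [pvGetLast?_cons _ _ hne]
    rw [List.dropLast_cons_of_ne_nil hne]
    rw [ih tl.length hlt tl rfl]
    rw [List.cons_append]
    split
    · cases hd : (pvSplitD tl).dropLast ++ [['c', 'o', 'm']] with
      | nil => simp at hd
      | cons p ps =>
        rw [PySem.Chars.join_cons_cons]
        simp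
    · conv_rhs => rw [← List.takeWhile_append_dropWhile (p := fun x => decide (x ≠ '.')) (l := cs)]
      rw [pvDropWhile_dot cs h]
  · rw [pvFixB_neg _ h, pvSplitD_neg _ h]
    simp only [List.getLast?_singleton, Option.getD_some]
    by_cases h1 : cs = [] <;> by_cases h2 : cs = ['c'] <;> by_cases h3 : cs = ['c', 'o'] <;>
      simp [h1, h2, h3, PySem.Chars.join_singleton]

theorem pvPyGet_last {α : Type} (xs : List α) (h : xs ≠ []) :
    PySem.List.pyGet? xs (-1) = xs.getLast? := by
  have hlen : 1 ≤ xs.length := List.length_pos_of_ne_nil h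
  simp only [PySem.List.pyGet?]
  unfold PySem.List.pyIdx?
  rw [if_neg (by omega), if_pos (by omega)]
  simp [List.getLast?_eq_getElem?]

theorem pvFixA_eq_fixB (s : String) : pvFixA s = String.ofList (pvFixB s.toList) := by
  rw [pvFixA]
  simp only [pvSplitOn_eq]
  have hne := pvSplitD_ne_nil s.toList
  rw [pvPyGet_last _ hne]
  cases hl : (pvSplitD s.toList).getLast? with
  | none =>
    rw [List.getLast?_eq_none_iff] at hl
    exact absurd hl hne
  | some last =>
    simp only []
    rw [pvFixB_eq, hl]
    simp only [Option.getD_some]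
    split
    · rw [pvSet_last _ hne]
    · exact (String.ofList_toList (s := s)).symm

-- ===== VERDICT (by name: the statement is the Claim_ definition above) =====
theorem format_emails_spec : Claim_equal_format_emails := by
  intro emails _
  unfold Spec_format_emails format_emails format_emails_alt
  apply List.map_congr_left
  intro e _
  cases e with
  | none => rfl
  | some s => simp [pvFixA_eq_fixB s]
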